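-- pv_equiv track=rewrite | github.com/amalrkrishna/quant_caesar_cipher | quant_caesar_cipher.py | disperse
-- ===== SOURCE A (Python) =====
-- def getListLength(myList):
--   """
--   getListLength function returns the length of an array
--   Args:
--     myList(list): array for which the length has to be calculated
--   Returns:
--     length(int) : length of array
--   """
--   length = 0
--
--   #iterate through each element in the list
--   for element in myList:
--       #increment length by 1 as each element is visited
--     length += 1
--   return length
--
-- def getRangeList(start, end, step=1):
--   """
--   getRangeList function recreates the range functionality in python
--   Args:
--     start(int): starting index
--     end(int): ending index
--     step(int): step size of the consecutive elements in the range
--   Returns: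
--     rangeList(list): A list of values within the range and the given step value
--   """
--   rangeList = []
--   current = start
--
--   while(current < end):
--     #append current to rangeList
--     rangeList += [current]
--     #increment current by step size
--     current += step
--   return rangeList
--
-- def disperse(S_SECOND_THIRD, C_SHIFT):
--   '''
--   Custom function to find the indexes to disperse C_SHIFT in S_SECOND_THIRD.
--
--   Args:
--     S_SECOND_THIRD(list): list(string) to search
--     C_SHIFT(list): list(string) we need to disperse into S_SECOND_THIRD
--   Return:
--     search_in_second_half(list): list of indexes to be dispersed
--
--   '''
--   #initialize an empty index array
--   search_in_second_half = []
--   index = 0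
--
--   #loops through each character in C_SHIFT
--   for i in getRangeList(0, getListLength(C_SHIFT)):
--     #loops through each character in S_SECOND_THIRD
--     for k in getRangeList(0, getListLength(S_SECOND_THIRD)):
--       if C_SHIFT[i] == S_SECOND_THIRD[k] and k >= index:
--         #each time C_SHIFT[i] and S_SECOND_THIRD[k] matches and k>= index
--         #append the index to search_in_second_half
--         index = k
--         search_in_second_half = search_in_second_half + [k]
--         #break if one dispersion index has been found for each C_SHIFT
--         break
--
--   return search_in_second_half
-- ===== SOURCE B (Python) =====
-- def disperse(S_SECOND_THIRD, C_SHIFT):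
--     # Index S once: char -> ascending list of its positions; then for each
--     # C_SHIFT char scan only that char's positions for the first one >= index.
--     positions = {}
--     for k, s in enumerate(S_SECOND_THIRD):
--         positions.setdefault(s, []).append(k)
--     result = []
--     index = 0
--     for c in C_SHIFT:
--         for p in positions.get(c, []):
--             if p >= index:
--                 index = p
--                 result.append(p)
--                 break
--     return result
-- ===== Notes on version B (the rewrite author's own statement) =====
-- stated objective: faster
-- what changed: B builds a char->ascending-positions index of S_SECOND_THIRD in one pass, then for each C_SHIFT element scans only that element's position list for the first position >= index, instead of A's rescanning all of S_SECOND_THIRD (via hand-rolled range/length helpers) for every element of C_SHIFT.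
import Mathlib
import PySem

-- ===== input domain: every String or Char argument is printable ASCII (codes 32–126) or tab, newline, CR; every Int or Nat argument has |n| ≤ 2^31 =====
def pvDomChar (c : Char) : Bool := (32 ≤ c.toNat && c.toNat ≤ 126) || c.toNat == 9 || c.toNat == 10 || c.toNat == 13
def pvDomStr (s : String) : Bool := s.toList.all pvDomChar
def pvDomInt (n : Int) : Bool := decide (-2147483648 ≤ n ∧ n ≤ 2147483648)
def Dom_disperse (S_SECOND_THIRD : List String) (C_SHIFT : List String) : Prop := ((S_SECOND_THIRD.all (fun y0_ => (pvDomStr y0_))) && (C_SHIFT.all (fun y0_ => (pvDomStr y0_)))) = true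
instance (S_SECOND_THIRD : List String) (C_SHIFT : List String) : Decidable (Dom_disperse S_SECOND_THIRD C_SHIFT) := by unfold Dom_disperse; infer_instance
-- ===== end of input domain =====

-- ===== PORT A =====
-- A-side helpers (literal ports of the module helpers A uses)
def getListLength {alpha : Type} (myList : List alpha) : Int :=
  myList.foldl (fun length _ => length + 1) 0

-- while current < end: append current; current += step.  (Python diverges for
-- step ≤ 0 with start < end; disperse only ever calls step = 1, so that branch
-- is unreachable and returns [] here.)
def getRangeList (start endv step : Int) : List Int :=
  if _h : start < endv then
    if _hp : 0 < step then start :: getRangeList (start + step) endv step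
    else []
  else []
termination_by (endv - start).toNat
decreasing_by omega

-- inner `for k in getRangeList(0, getListLength(S))` with the break
def disperseInnerA (S : List String) (c : String) (index : Int) (acc : List Int) :
    List Int → Int × List Int
  | [] => (index, acc)
  | k :: ks =>
    if (c == PySem.List.pyGetD S k "") && decide (index ≤ k) then
      (k, acc ++ [k])
    else disperseInnerA S c index acc ks

-- outer `for i in getRangeList(0, getListLength(C_SHIFT))`
def disperseOuterA (S C : List String) (index : Int) (acc : List Int) :
    List Int → List Int
  | [] => acc
  | i :: is =>
    let r := disperseInnerA S (PySem.List.pyGetD C i "") index acc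
      (getRangeList 0 (getListLength S) 1)
    disperseOuterA S C r.1 r.2 is

def disperse (S_SECOND_THIRD : List String) (C_SHIFT : List String) : List Int :=
  disperseOuterA S_SECOND_THIRD C_SHIFT 0 []
    (getRangeList 0 (getListLength C_SHIFT) 1)

-- ===== PORT B =====
-- positions.setdefault(s, []).append(k) over enumerate(S)
def buildPositions (S : List String) : PySem.Dict String (List Int) :=
  (PySem.List.enumerate S).foldl
    (fun d p => d.modify p.2 [] (fun l => l ++ [p.1])) PySem.Dict.empty

-- `for p in positions.get(c, []): if p >= index: ...; break`
def findFrom (index : Int) : List Int → Option Int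
  | [] => none
  | p :: ps => if index ≤ p then some p else findFrom index ps

def disperseLoopB (pos : PySem.Dict String (List Int)) (index : Int) (acc : List Int) :
    List String → List Int
  | [] => acc
  | c :: cs =>
    match findFrom index (pos.getD c []) with
    | none => disperseLoopB pos index acc cs
    | some p => disperseLoopB pos p (acc ++ [p]) cs

def disperse_alt (S_SECOND_THIRD : List String) (C_SHIFT : List String) : List Int :=
  disperseLoopB (buildPositions S_SECOND_THIRD) 0 [] C_SHIFT

-- ===== PRECONDITION & SPEC =====
def Spec_disperse (S_SECOND_THIRD : List String) (C_SHIFT : List String) (out : List Int) : Prop := out = disperse_alt S_SECOND_THIRD C_SHIFT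
instance (S_SECOND_THIRD : List String) (C_SHIFT : List String) (out : List Int) : Decidable (Spec_disperse S_SECOND_THIRD C_SHIFT out) := by unfold Spec_disperse; infer_instance

-- ===== CLAIM (what is proved, stated in full; the proofs are below) =====
def Claim_equal_disperse : Prop := ∀ (S_SECOND_THIRD : List String) (C_SHIFT : List String), Dom_disperse S_SECOND_THIRD C_SHIFT → Spec_disperse S_SECOND_THIRD C_SHIFT (disperse S_SECOND_THIRD C_SHIFT)

-- ===== LEMMAS AND PROOFS =====

lemma getListLength_eq_aux {alpha : Type} (l : List alpha) : ∀ (i : Int),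
    l.foldl (fun n _ => n + 1) i = i + l.length := by
  induction l with
  | nil => simp
  | cons x xs ih => intro i; simp [List.foldl, ih]; omega

lemma getListLength_eq {alpha : Type} (l : List alpha) :
    getListLength l = (l.length : Int) := by
  simp [getListLength, getListLength_eq_aux]

lemma getRangeList_eq_pyRange (endv : Int) : ∀ (start : Int),
    getRangeList start endv 1 = PySem.List.pyRange start endv 1 := by
  intro start
  induction h : (endv - start).toNat generalizing start with
  | zero =>
    rw [getRangeList, PySem.List.pyRange_one_eq_nil (by omega)]
    simp [show ¬ start < endv by omega]
  | succ n ih =>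
    rw [getRangeList, PySem.List.pyRange_one_cons (by omega)]
    simp [show start < endv by omega, ih (start + 1) (by omega)]

-- proof-local shape of A's outer loop after the index list has been mapped to chars
def loopCharsA (S : List String) (index : Int) (acc : List Int) : List String → List Int
  | [] => acc
  | c :: cs =>
    let r := disperseInnerA S c index acc (getRangeList 0 (getListLength S) 1)
    loopCharsA S r.1 r.2 cs

lemma outerA_eq_loopChars (S C : List String) : ∀ (ks : List Int) (index : Int) (acc : List Int),
    disperseOuterA S C index acc ks
      = loopCharsA S index acc (ks.map (fun i => PySem.List.pyGetD C i "")) := by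
  intro ks
  induction ks with
  | nil => intro index acc; rfl
  | cons k ks ih => intro index acc; simp [disperseOuterA, loopCharsA, ih]

-- A's inner scan over any index list equals first-match on the filtered list
lemma innerA_eq_findFrom (S : List String) (c : String) :
    ∀ (ks : List Int) (index : Int) (acc : List Int),
    disperseInnerA S c index acc ks =
      (match findFrom index (ks.filter (fun k => c == PySem.List.pyGetD S k "")) with
       | none => (index, acc)
       | some p => (p, acc ++ [p])) := by
  intro ks
  induction ks with
  | nil => intro index acc; rfl
  | cons k ks ih =>
    intro index acc
    by_cases hc : (c == PySem.List.pyGetD S k "") = true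
    · by_cases hi : index ≤ k
      · simp [disperseInnerA, hc, hi, List.filter, findFrom]
      · simp [disperseInnerA, hc, hi, List.filter, findFrom, ih]
    · simp [disperseInnerA, hc, List.filter, ih]

-- what buildPositions stores under key c: the ascending positions of c in S
lemma buildPositions_getD (S : List String) (c : String) :
    (buildPositions S).getD c []
      = (PySem.List.pyRange 0 (S.length : Int) 1).filter
          (fun j => c == PySem.List.pyGetD S j "") := by
  have h1 : buildPositions S
      = ((PySem.List.enumerate S).map (fun p => (p.2, p.1))).foldl
          (fun d p => d.modify p.1 [] (fun l => l ++ [p.2])) PySem.Dict.empty := by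
    rw [List.foldl_map]; rfl
  rw [h1, PySem.Dict.getD_foldl_modify_append]
  rw [PySem.List.enumerate_eq_map_pyRange S ""]
  rw [List.map_map, List.filter_map, List.map_map]
  simp only [PySem.List.len_eq]
  rw [List.filter_congr (fun j _ => by
    show ((fun p => p.1 == c) ∘ ((fun p : Int × String => (p.2, p.1)) ∘
        (fun j : Int => (j, PySem.List.pyGetD S j "")))) j
      = (fun j => c == PySem.List.pyGetD S j "") j
    simp [Function.comp, Bool.beq_comm])]
  have : ((fun p : String × Int => p.2) ∘ ((fun p : Int × String => (p.2, p.1)) ∘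
      (fun j : Int => (j, PySem.List.pyGetD S j "")))) = id := by
    funext j; rfl
  rw [this, List.map_id]
  simp [PySem.Dict.getD_empty]

lemma loopCharsA_eq_loopB (S : List String) :
    ∀ (C : List String) (index : Int) (acc : List Int),
    loopCharsA S index acc C = disperseLoopB (buildPositions S) index acc C := by
  intro C
  induction C with
  | nil => intro index acc; rfl
  | cons c cs ih =>
    intro index acc
    rw [loopCharsA, disperseLoopB, getListLength_eq, getRangeList_eq_pyRange,
        innerA_eq_findFrom, ← buildPositions_getD S c]
    cases findFrom index ((buildPositions S).getD c []) with
    | none => simp [ih]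
    | some p => simp [ih]

-- ===== VERDICT (by name: the statement is the Claim_ definition above) =====
theorem disperse_spec : Claim_equal_disperse := by
  intro S C _
  show disperse S C = disperse_alt S C
  rw [disperse, disperse_alt, getListLength_eq, getRangeList_eq_pyRange,
      outerA_eq_loopChars, PySem.List.map_pyGetD_pyRange_zero']
  exact loopCharsA_eq_loopB S C 0 []
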